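-- pv_equiv track=rewrite | github.com/enaa99/Algorithm | baekjoonPython/프로그래머스/두개뽑아서더하기.py | solution
-- ===== SOURCE A (Python) =====
-- def solution(numbers):
--     answer = set()
--
--     arr = [0]*2
--     def dfs(depth,v):
--         if depth == 2:
--             answer.add(sum(arr))
--             return
--
--         for i in range(v,len(numbers)):
--                 arr[depth] = numbers[i]
--                 dfs(depth+1,i+1)
--
--     dfs(0,0)
--
--
--     return sorted(list(answer))
-- ===== SOURCE B (Python) =====
-- def solution(numbers):
--     answer = set()
--     n = len(numbers)
--     for i in range(n):
--         for j in range(i + 1, n):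
--             answer.add(numbers[i] + numbers[j])
--     return sorted(answer)
-- ===== Notes on version B (the rewrite author's own statement) =====
-- stated objective: simpler
-- what changed: Replaces the depth-limited recursive dfs with a mutable 2-slot array by a flat nested index loop adding numbers[i]+numbers[j] directly to the set.
import Mathlib
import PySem

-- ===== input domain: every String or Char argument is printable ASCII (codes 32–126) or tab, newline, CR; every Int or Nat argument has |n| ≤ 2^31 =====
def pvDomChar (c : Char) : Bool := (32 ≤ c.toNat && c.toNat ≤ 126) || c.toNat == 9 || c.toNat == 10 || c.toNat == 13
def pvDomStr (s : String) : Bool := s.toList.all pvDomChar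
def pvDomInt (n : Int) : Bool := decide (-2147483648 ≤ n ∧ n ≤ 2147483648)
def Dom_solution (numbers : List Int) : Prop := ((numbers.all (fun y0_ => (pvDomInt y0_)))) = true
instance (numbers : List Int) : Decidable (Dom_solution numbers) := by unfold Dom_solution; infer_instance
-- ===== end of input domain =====

-- B replaces A's depth-limited recursive dfs (mutable 2-slot array) by a flat nested index loop; objective: simpler.


-- ===== PORT A =====
-- dfs(depth, v) mutating arr and answer; fuel = 2 - depth makes the structural recursion total
-- (Python's dfs is only ever called with depth ≤ 2, where fuel never runs out).
-- numbers[i] is read with pyGetD (indices produced by range(v, len(numbers)) are always in range).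
def dfsA (numbers : List Int) : Nat → Nat → Int → (List Int × PySem.Set Int) → (List Int × PySem.Set Int)
  | fuel, depth, v, st =>
    if depth == 2 then
      (st.1, PySem.Set.add st.2 st.1.sum)
    else
      match fuel with
      | 0 => st
      | fuel + 1 =>
        (PySem.List.pyRange v numbers.length 1).foldl
          (fun st i =>
            dfsA numbers fuel (depth + 1) (i + 1)
              (PySem.List.pySetD st.1 (depth : Int) (PySem.List.pyGetD numbers i 0), st.2))
          st

def solution (numbers : List Int) : List Int :=
  let st := dfsA numbers 2 0 0 ([0, 0], PySem.Set.empty)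
  PySem.List.sorted st.2 (fun x => x) false

-- ===== PORT B =====
def solution_alt (numbers : List Int) : List Int :=
  let n : Int := numbers.length
  let answer : PySem.Set Int :=
    (PySem.List.pyRange 0 n 1).foldl
      (fun ans i =>
        (PySem.List.pyRange (i + 1) n 1).foldl
          (fun ans j =>
            PySem.Set.add ans (PySem.List.pyGetD numbers i 0 + PySem.List.pyGetD numbers j 0))
          ans)
      PySem.Set.empty
  PySem.List.sorted answer (fun x => x) false

-- ===== PRECONDITION & SPEC =====
def Spec_solution (numbers : List Int) (out : List Int) : Prop := out = solution_alt numbers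
instance (numbers : List Int) (out : List Int) : Decidable (Spec_solution numbers out) := by unfold Spec_solution; infer_instance

-- ===== CLAIM (what is proved, stated in full; the proofs are below) =====
def Claim_equal_solution : Prop := ∀ (numbers : List Int), Dom_solution numbers → Spec_solution numbers (solution numbers)

-- ===== LEMMAS AND PROOFS =====

-- the inner loop (depth = 1): arr stays [a, _] and the answer set collects a + numbers[j]
theorem inner_fold (g : Int → Int) (l : List Int) :
    ∀ (a b : Int) (ans : PySem.Set Int),
      ∃ b', l.foldl
          (fun (st : List Int × PySem.Set Int) (j : Int) =>
            (PySem.List.pySetD st.1 (1 : Int) (g j),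
             PySem.Set.add st.2 (PySem.List.pySetD st.1 (1 : Int) (g j)).sum))
          ([a, b], ans)
        = ([a, b'], l.foldl (fun ans j => PySem.Set.add ans (a + g j)) ans) := by
  induction l with
  | nil => exact fun a b ans => ⟨b, rfl⟩
  | cons j l ih =>
    intro a b ans
    have h1 : PySem.List.pySetD [a, b] (1 : Int) (g j) = [a, g j] := by
      simp [PySem.List.pySetD_of_nonneg]
    simp only [List.foldl_cons, h1]
    have h2 : ([a, g j] : List Int).sum = a + g j := by simp
    rw [h2]
    exact ih a (g j) (PySem.Set.add ans (a + g j))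

theorem dfsA_one (numbers : List Int) (v a b : Int) (ans : PySem.Set Int) :
    ∃ b', dfsA numbers 1 1 v ([a, b], ans)
        = ([a, b'], (PySem.List.pyRange v numbers.length 1).foldl
            (fun ans j => PySem.Set.add ans (a + PySem.List.pyGetD numbers j 0)) ans) := by
  rw [dfsA]
  have hstep :
      (fun (st : List Int × PySem.Set Int) (i : Int) =>
        dfsA numbers 0 (1 + 1) (i + 1)
          (PySem.List.pySetD st.1 ((1 : Nat) : Int) (PySem.List.pyGetD numbers i 0), st.2))
      = (fun (st : List Int × PySem.Set Int) (j : Int) =>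
          (PySem.List.pySetD st.1 (1 : Int) (PySem.List.pyGetD numbers j 0),
           PySem.Set.add st.2 (PySem.List.pySetD st.1 (1 : Int) (PySem.List.pyGetD numbers j 0)).sum)) := by
    funext st i
    rw [dfsA]
    simp
  simp only [hstep]
  exact inner_fold (fun j => PySem.List.pyGetD numbers j 0)
    (PySem.List.pyRange v numbers.length 1) a b ans

-- the outer loop (depth = 0): the answer set collects numbers[i] + numbers[j]
theorem outer_fold (numbers : List Int) (l : List Int) :
    ∀ (a b : Int) (ans : PySem.Set Int),
      ∃ a' b', l.foldl
          (fun (st : List Int × PySem.Set Int) (i : Int) =>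
            dfsA numbers 1 1 (i + 1)
              (PySem.List.pySetD st.1 ((0 : Nat) : Int) (PySem.List.pyGetD numbers i 0), st.2))
          ([a, b], ans)
        = ([a', b'],
           l.foldl
             (fun ans i =>
               (PySem.List.pyRange (i + 1) numbers.length 1).foldl
                 (fun ans j =>
                   PySem.Set.add ans (PySem.List.pyGetD numbers i 0 + PySem.List.pyGetD numbers j 0))
                 ans)
             ans) := by
  induction l with
  | nil => exact fun a b ans => ⟨a, b, rfl⟩
  | cons i l ih =>
    intro a b ans
    have h1 : PySem.List.pySetD [a, b] ((0 : Nat) : Int) (PySem.List.pyGetD numbers i 0)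
        = [PySem.List.pyGetD numbers i 0, b] := by
      simp [PySem.List.pySetD_of_nonneg]
    simp only [List.foldl_cons, h1]
    obtain ⟨b', hb⟩ := dfsA_one numbers (i + 1) (PySem.List.pyGetD numbers i 0) b ans
    rw [hb]
    exact ih (PySem.List.pyGetD numbers i 0) b' _

-- ===== VERDICT (by name: the statement is the Claim_ definition above) =====
theorem solution_spec : Claim_equal_solution := by
  intro numbers _
  unfold Spec_solution solution solution_alt
  rw [dfsA]
  obtain ⟨a', b', h⟩ := outer_fold numbers (PySem.List.pyRange 0 numbers.length 1) 0 0 PySem.Set.empty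
  simp only [Nat.cast_zero] at h ⊢
  rw [h]
  simp
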